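-- pv_equiv track=rewrite | github.com/TotallyNotChase/funky-prime-generator | python/sieve_and_str_check.py | is_glitch
-- ===== SOURCE A (Python) =====
-- def is_glitch(num):
--     # Check if the number is a glitch number
--     numstr = str(num)
--     if len(numstr) < 3:
--         # Glitch numbers must be at least 3 digits
--         return False
--     """
--       Find the common character in the first few digits
--       i.e if we feed in 9999899, the common char is 9
--     """
--     if numstr[0] == numstr[1] or numstr[0] == numstr[2]:
--         commonchar = numstr[0]
--     elif numstr[1] == numstr[2]:
--         commonchar = numstr[1];
--     else:
--         # If no common character is found
--         # i.e 968999 or 988999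
--         return False
--     """
--       The above conditional statements will still find a common char
--       even if the number is 99986574, this is why we loop through for
--       additional checks
--     """
--     unqcharcount = 0
--     for i in numstr:
--     # Checks for multiple unique digits
--     # i.e digits that are not common digits
--         if i != commonchar:
--             unqcharcount += 1
--         if unqcharcount > 1:
--             break
--     if unqcharcount == 1:
--         # Must have exactly one unique digit
--         return True
--     else:
--         return False
-- ===== SOURCE B (Python) =====
-- def is_glitch(num):
--     # Glitch = exactly one character of str(num) differs from all the others.
--     # Idiomatic global count instead of A's first-three-digit branching + early-break scan.
--     s = str(num)
--     return len(s) >= 3 and any(s.count(c) == len(s) - 1 for c in set(s))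
-- ===== Notes on version B (the rewrite author's own statement) =====
-- stated objective: idiomatic
-- what changed: Replaces A's common-char detection among the first three characters plus an early-break unique-count loop with a single global criterion: some character occurs len-1 times.
import Mathlib
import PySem

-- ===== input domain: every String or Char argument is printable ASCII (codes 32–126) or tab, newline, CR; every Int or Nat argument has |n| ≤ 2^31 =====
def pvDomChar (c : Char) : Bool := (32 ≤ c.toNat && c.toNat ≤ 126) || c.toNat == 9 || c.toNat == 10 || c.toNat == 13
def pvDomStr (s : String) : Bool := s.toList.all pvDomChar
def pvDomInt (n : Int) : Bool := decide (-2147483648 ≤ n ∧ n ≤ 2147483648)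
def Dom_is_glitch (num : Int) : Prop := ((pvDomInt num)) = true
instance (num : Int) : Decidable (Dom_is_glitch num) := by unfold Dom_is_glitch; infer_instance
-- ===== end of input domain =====

-- B replaces A's first-three-digit common-char branching + early-break scan with the
-- global criterion "some character occurs len(s)-1 times" (idiomatic; not claimed faster).

-- ===== PORT A =====
-- the 'for i in numstr' loop with its 'break': running unique-char count, stop once it exceeds 1
def pvLoopCount : List Char → Char → Nat → Nat
  | [], _, acc => acc
  | c :: rest, common, acc =>
    let acc' := if c != common then acc + 1 else acc
    if acc' > 1 then acc' else pvLoopCount rest common acc'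

def is_glitch (num : Int) : Bool :=
  let s := (PySem.Int.toStr num).toList   -- numstr = str(num), as its code points
  if s.length < 3 then false
  else
    match PySem.List.pyGet? s 0, PySem.List.pyGet? s 1, PySem.List.pyGet? s 2 with
    | some c0, some c1, some c2 =>
        let common? : Option Char :=
          if c0 = c1 ∨ c0 = c2 then some c0
          else if c1 = c2 then some c1
          else none
        match common? with
        | none => false
        | some commonchar => pvLoopCount s commonchar 0 == 1
    | _, _, _ => false

-- ===== PORT B =====
-- s.count(c) for a single character c is exactly List.count c on the code points
def is_glitch_alt (num : Int) : Bool :=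
  let s := (PySem.Int.toStr num).toList
  decide (3 ≤ s.length) && (PySem.Set.ofList s).any (fun c => s.count c == s.length - 1)

-- ===== PRECONDITION & SPEC =====
def Spec_is_glitch (num : Int) (out : Bool) : Prop := out = is_glitch_alt num
instance (num : Int) (out : Bool) : Decidable (Spec_is_glitch num out) := by unfold Spec_is_glitch; infer_instance

-- ===== CLAIM (what is proved, stated in full; the proofs are below) =====
def Claim_equal_is_glitch : Prop := ∀ (num : Int), Dom_is_glitch num → Spec_is_glitch num (is_glitch num)

-- ===== LEMMAS AND PROOFS =====

theorem count_add_countP (l : List Char) (c : Char) :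
    l.count c + l.countP (· != c) = l.length := by
  induction l with
  | nil => simp
  | cons a t ih => by_cases h : a = c <;> simp [h] <;> omega

theorem countP_ne_one_iff (l : List Char) (c : Char) (h3 : 3 ≤ l.length) :
    ((l.count c == l.length - 1) = true) ↔ l.countP (· != c) = 1 := by
  have := count_add_countP l c
  simp only [beq_iff_eq]
  omega

theorem pvLoopCount_eq (d : Char) : ∀ (l : List Char) (acc : Nat), acc ≤ 1 →
    pvLoopCount l d acc = min (acc + l.countP (· != d)) 2 := by
  intro l
  induction l with
  | nil => intro acc h; simp [pvLoopCount]; omega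
  | cons c rest ih =>
    intro acc h
    simp only [pvLoopCount, List.countP_cons]
    rcases Bool.eq_false_or_eq_true (c != d) with hb | hb <;>
      simp only [hb, Bool.false_eq_true, if_true, if_false] <;>
      split <;> first | omega | (rw [ih _ (by omega)]; omega)

theorem loop_one_iff (l : List Char) (d : Char) :
    ((pvLoopCount l d 0 == 1) = true) ↔ l.countP (· != d) = 1 := by
  rw [pvLoopCount_eq d l 0 (by omega)]
  simp only [beq_iff_eq, Nat.zero_add]
  omega

theorem core_eq (c0 c1 c2 : Char) (rest : List Char) :
    (if c0 = c1 ∨ c0 = c2 then pvLoopCount (c0::c1::c2::rest) c0 0 == 1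
     else if c1 = c2 then pvLoopCount (c0::c1::c2::rest) c1 0 == 1
     else false)
    = (PySem.Set.ofList (c0::c1::c2::rest)).any
        (fun c => (c0::c1::c2::rest).count c == (c0::c1::c2::rest).length - 1) := by
  set l : List Char := c0::c1::c2::rest with hl
  have h3 : 3 ≤ l.length := by simp [hl]
  rw [Bool.eq_iff_iff]
  have hany : ((PySem.Set.ofList l).any (fun c => l.count c == l.length - 1) = true) ↔
      ∃ c ∈ l, l.countP (· != c) = 1 := by
    rw [List.any_eq_true]
    constructor
    · rintro ⟨c, hc, hp⟩
      exact ⟨c, (PySem.Set.mem_ofList _ _).1 hc, (countP_ne_one_iff l c h3).1 hp⟩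
    · rintro ⟨c, hc, hp⟩
      exact ⟨c, (PySem.Set.mem_ofList _ _).2 hc, (countP_ne_one_iff l c h3).2 hp⟩
  rw [hany]
  constructor
  · intro h
    split_ifs at h with h1 h2
    · exact ⟨c0, by simp [hl], (loop_one_iff l c0).1 h⟩
    · exact ⟨c1, by simp [hl], (loop_one_iff l c1).1 h⟩
  · rintro ⟨c, -, hp⟩
    have hexp : l.countP (· != c) =
        ((rest.countP (· != c) + (if c2 != c then 1 else 0)) + (if c1 != c then 1 else 0))
          + (if c0 != c then 1 else 0) := by
      simp only [hl, List.countP_cons]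
    by_cases h0 : c0 = c <;> by_cases h1 : c1 = c <;> by_cases h2 : c2 = c
    · -- c0 = c1 = c
      rw [if_pos (Or.inl (h0.trans h1.symm))]
      exact (loop_one_iff l c0).2 (by rw [h0]; exact hp)
    · -- c0 = c1 = c, c2 ≠ c
      rw [if_pos (Or.inl (h0.trans h1.symm))]
      exact (loop_one_iff l c0).2 (by rw [h0]; exact hp)
    · -- c0 = c2 = c, c1 ≠ c
      rw [if_pos (Or.inr (h0.trans h2.symm))]
      exact (loop_one_iff l c0).2 (by rw [h0]; exact hp)
    · -- only c0 = c: two of the first three differ from c, impossible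
      simp [h0, h1, h2] at hexp; omega
    · -- c1 = c2 = c, c0 ≠ c
      have hne : ¬(c0 = c1 ∨ c0 = c2) := by
        rintro (h | h)
        · exact h0 (h.trans h1)
        · exact h0 (h.trans h2)
      rw [if_neg hne, if_pos (h1.trans h2.symm)]
      exact (loop_one_iff l c1).2 (by rw [h1]; exact hp)
    · simp [h0, h1, h2] at hexp; omega
    · simp [h0, h1, h2] at hexp; omega
    · simp [h0, h1, h2] at hexp; omega

theorem pyGet3 (c0 c1 c2 : Char) (rest : List Char) :
    PySem.List.pyGet? (c0::c1::c2::rest) 0 = some c0 ∧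
    PySem.List.pyGet? (c0::c1::c2::rest) 1 = some c1 ∧
    PySem.List.pyGet? (c0::c1::c2::rest) 2 = some c2 := by
  refine ⟨?_, ?_, ?_⟩ <;>
    simp [PySem.List.pyGet?, PySem.List.pyIdx?,
      show ((0:Int) ≤ (rest.length:Int)+1+1) by omega,
      show ((0:Int) ≤ (rest.length:Int)+1) by omega,
      show ((2:Int) ≤ (rest.length:Int)+1+1) by omega]

-- ===== VERDICT (by name: the statement is the Claim_ definition above) =====
theorem is_glitch_spec : Claim_equal_is_glitch := by
  intro num _
  unfold Spec_is_glitch is_glitch is_glitch_alt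
  generalize (PySem.Int.toStr num).toList = l
  obtain _ | ⟨c0, _ | ⟨c1, _ | ⟨c2, rest⟩⟩⟩ := l
  · simp
  · simp
  · simp
  · obtain ⟨h0, h1, h2⟩ := pyGet3 c0 c1 c2 rest
    simp only [h0, h1, h2, List.length_cons]
    rw [if_neg (by omega)]
    have hm : (match if c0 = c1 ∨ c0 = c2 then some c0 else if c1 = c2 then some c1 else none with
        | none => false
        | some commonchar => pvLoopCount (c0::c1::c2::rest) commonchar 0 == 1)
        = (if c0 = c1 ∨ c0 = c2 then pvLoopCount (c0::c1::c2::rest) c0 0 == 1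
           else if c1 = c2 then pvLoopCount (c0::c1::c2::rest) c1 0 == 1
           else false) := by split_ifs <;> rfl
    rw [hm]
    have hc := core_eq c0 c1 c2 rest
    simp only [List.length_cons] at hc
    rw [hc]
    simp
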